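-- pv_equiv track=rewrite | github.com/itachikryst/WeightCalc | WeightCalc/dataManip.py | get_best_day
-- ===== SOURCE A (Python) =====
-- def get_best_day(_data):
--     bestDay = _data[0]
--     for i, day in enumerate(_data):
--         if len(day) == 1:
--             break
--         if day[1] < bestDay[1]:
--             bestDay = day
--     return bestDay
-- ===== SOURCE B (Python) =====
-- def _eligible(days):
--     # recursively collect days up to (not including) the first day of length 1
--     if not days or len(days[0]) == 1:
--         return []
--     return [days[0]] + _eligible(days[1:])
--
--
-- def get_best_day(_data):
--     ranked = sorted(_eligible(_data), key=lambda d: d[1])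
--     return ranked[0] if ranked else _data[0]
-- ===== Notes on version B (the rewrite author's own statement) =====
-- stated objective: alternative
-- what changed: Replaces the running-minimum loop with early break by sort-based selection: a recursive helper collects the eligible prefix (days before the first length-1 day), a stable sort ranks it by d[1], and the first ranked day is returned (stability reproduces A's first-minimum tie rule), with the _data[0] fallback for an empty prefix.
import Mathlib
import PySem

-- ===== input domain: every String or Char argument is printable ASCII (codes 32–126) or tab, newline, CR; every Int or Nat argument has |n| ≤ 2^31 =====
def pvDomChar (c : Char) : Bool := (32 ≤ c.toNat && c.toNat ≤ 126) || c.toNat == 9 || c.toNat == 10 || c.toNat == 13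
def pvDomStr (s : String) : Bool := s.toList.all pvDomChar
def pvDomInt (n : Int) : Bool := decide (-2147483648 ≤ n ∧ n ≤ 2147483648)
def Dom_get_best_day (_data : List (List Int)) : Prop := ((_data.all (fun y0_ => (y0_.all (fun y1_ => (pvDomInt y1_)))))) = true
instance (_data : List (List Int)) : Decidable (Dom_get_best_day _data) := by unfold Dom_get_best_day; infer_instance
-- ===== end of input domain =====

-- B replaces A's running-minimum loop (with early break) by sort-based selection: recursively collect the eligible prefix, stably sort it by d[1], return the first ranked day; objective: alternative algorithm, similar cost.


-- day[1]: exact on Pre_ (every accessed day has length ≥ 2); the .getD 0 default is only reached outside Pre_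
def key1 (d : List Int) : Int := (PySem.List.pyGet? d 1).getD 0

-- ===== PORT A =====
-- the for-loop of A: running best with break on a length-1 day
def goA (best : List Int) (days : List (List Int)) : List Int :=
  match days with
  | [] => best
  | day :: rest =>
      if day.length == 1 then best
      else if key1 day < key1 best then goA day rest else goA best rest

def get_best_day (_data : List (List Int)) : List Int :=
  match _data with
  | [] => []            -- _data[0] raises IndexError in Python: excluded by Pre_
  | d0 :: _ => goA d0 _data

-- ===== PORT B =====
-- Source B's recursive helper _eligible: days up to (not including) the first length-1 day
def eligible (days : List (List Int)) : List (List Int) :=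
  match days with
  | [] => []
  | d :: rest => if d.length == 1 then [] else d :: eligible rest

def get_best_day_alt (_data : List (List Int)) : List Int :=
  let ranked := PySem.List.sorted (eligible _data) key1   -- stable sort by d[1]
  match ranked with
  | m :: _ => m                 -- ranked[0]
  | [] => _data.headD []        -- _data[0]; the [] default is only reached outside Pre_ (_data = [])

-- ===== PRECONDITION & SPEC =====
-- Pre_ excludes exactly the inputs where Python A raises IndexError: empty _data,
-- and any day shorter than 2 encountered before the first length-1 day.
def Pre_get_best_day (_data : List (List Int)) : Prop :=
  _data ≠ [] ∧ ∀ d ∈ _data.takeWhile (fun d => !(d.length == 1)), 2 ≤ d.length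
instance (_data : List (List Int)) : Decidable (Pre_get_best_day _data) := by unfold Pre_get_best_day; infer_instance
def pvWitness_get_best_day : List (List Int) := [[1, 2], [3, 0], [4]]

def Spec_get_best_day (_data : List (List Int)) (out : List Int) : Prop := out = get_best_day_alt _data
instance (_data : List (List Int)) (out : List Int) : Decidable (Spec_get_best_day _data out) := by unfold Spec_get_best_day; infer_instance

-- ===== CLAIM (what is proved, stated in full; the proofs are below) =====
def Claim_equal_get_best_day : Prop := ∀ (_data : List (List Int)), Dom_get_best_day _data → Pre_get_best_day _data → Spec_get_best_day _data (get_best_day _data)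

-- ===== LEMMAS AND PROOFS =====

-- the running-minimum step of A's loop
def stepMin (m x : List Int) : List Int := if key1 x < key1 m then x else m

-- Source B's eligible prefix is the takeWhile prefix
lemma eligible_eq_takeWhile (xs : List (List Int)) :
    eligible xs = xs.takeWhile (fun d => !(d.length == 1)) := by
  induction xs with
  | nil => rfl
  | cons d t ih =>
      by_cases h : d.length == 1 <;> simp [eligible, h, ih]

-- A's loop is the running minimum over the takeWhile prefix
lemma goA_eq_foldl (days : List (List Int)) (best : List Int) :
    goA best days = (days.takeWhile (fun d => !(d.length == 1))).foldl stepMin best := by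
  induction days generalizing best with
  | nil => rfl
  | cons day rest ih =>
      by_cases h : day.length == 1
      · simp [goA, h]
      · simp only [goA, h, List.takeWhile_cons]
        by_cases hk : key1 day < key1 best <;> simp [hk, ih, stepMin]

-- head of the insertion step: x becomes the head iff it beats the current head
lemma head_insertBy (before : List Int → List Int → Bool) (x : List Int) (acc : List (List Int)) :
    (PySem.List.insertBy before x acc).head? =
      match acc.head? with
      | none => some x
      | some y => if before x y then some x else some y := by
  cases acc with
  | nil => rfl
  | cons y t => by_cases h : before x y <;> simp [PySem.List.insertBy, h]

-- the head of the insertion-sort fold evolves exactly as a running minimum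
lemma head_foldl_insertBy (xs : List (List Int)) (acc : List (List Int)) :
    (xs.foldl (fun a x => PySem.List.insertBy (fun a b => decide (key1 a < key1 b)) x a) acc).head? =
      xs.foldl (fun o x =>
        match o with
        | none => some x
        | some m => if key1 x < key1 m then some x else some m) acc.head? := by
  induction xs generalizing acc with
  | nil => rfl
  | cons x t ih =>
      rw [List.foldl_cons, List.foldl_cons, ih, head_insertBy]
      cases acc.head? <;> simp

-- head of the stable sort = the running minimum of A's loop (first minimum wins ties)
lemma head_sorted_eq (c : List Int) (cs : List (List Int)) :
    (PySem.List.sorted (c :: cs) key1).head? = some (cs.foldl stepMin c) := by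
  unfold PySem.List.sorted
  simp only [if_neg (by decide : ¬ (false = true))]
  rw [head_foldl_insertBy]
  simp only [List.foldl_cons, List.head?_nil]
  induction cs generalizing c with
  | nil => rfl
  | cons x t ih =>
      simp only [List.foldl_cons, stepMin]
      by_cases h : key1 x < key1 c <;> simp [h, ih]

-- ===== VERDICT (by name: the statement is the Claim_ definition above) =====
theorem get_best_day_spec : Claim_equal_get_best_day := by
  intro _data _ hpre
  unfold Spec_get_best_day get_best_day get_best_day_alt
  obtain ⟨hne, -⟩ := hpre
  cases _data with
  | nil => exact absurd rfl hne
  | cons d0 rest =>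
      simp only [eligible_eq_takeWhile]
      by_cases h0 : d0.length == 1
      · simp [goA, h0, PySem.List.sorted]
      · rw [goA_eq_foldl]
        simp only [List.takeWhile_cons, h0, Bool.not_false, if_true]
        have := head_sorted_eq d0 ((rest).takeWhile (fun d => !(d.length == 1)))
        cases hs : PySem.List.sorted (d0 :: rest.takeWhile (fun d => !(d.length == 1))) key1 with
        | nil => simp [hs] at this
        | cons m t =>
            rw [hs] at this
            simp only [List.head?_cons, Option.some.injEq] at this
            simp only [List.foldl_cons, stepMin, if_neg (lt_irrefl (key1 d0))] at this ⊢
            exact this.symm
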